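-- pv_equiv track=rewrite | github.com/19rehan/scholarpath | master_scraper_v2.py | detect_region
-- ===== SOURCE A (Python) =====
-- def detect_region(country):
--     regions = {
--         'Europe': ['United Kingdom','Germany','France','Netherlands','Sweden',
--                    'Norway','Finland','Denmark','Switzerland','Austria','Belgium',
--                    'Italy','Spain','Portugal','Poland','Czech Republic','Hungary',
--                    'Romania','Slovakia','Slovenia','Croatia','Greece','Bulgaria',
--                    'Lithuania','Latvia','Estonia','Ireland','Luxembourg'],
--         'Middle East': ['Turkey','Saudi Arabia','UAE','Qatar','Jordan',
--                         'Kuwait','Oman','Bahrain','Egypt','Morocco','Tunisia','Algeria'],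
--         'Asia': ['China','Japan','South Korea','Malaysia','Singapore',
--                  'Thailand','Indonesia','Vietnam','Taiwan','Hong Kong',
--                  'Pakistan','India','Bangladesh','Sri Lanka','Nepal','Philippines'],
--         'Oceania': ['Australia','New Zealand'],
--         'North America': ['USA','Canada','Mexico'],
--         'Africa': ['Nigeria','South Africa','Kenya','Ghana','Ethiopia',
--                    'Tanzania','Uganda','Rwanda','Zimbabwe'],
--         'Latin America': ['Brazil','Colombia','Peru','Argentina','Chile'],
--     }
--     for region, countries in regions.items():
--         if country in countries:
--             return region
--     return "International"
-- ===== SOURCE B (Python) =====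
-- # Region lookup as a single flat literal dictionary: one direct lookup, no scan.
-- _COUNTRY_TO_REGION = {
--     'United Kingdom': 'Europe',
--     'Germany': 'Europe',
--     'France': 'Europe',
--     'Netherlands': 'Europe',
--     'Sweden': 'Europe',
--     'Norway': 'Europe',
--     'Finland': 'Europe',
--     'Denmark': 'Europe',
--     'Switzerland': 'Europe',
--     'Austria': 'Europe',
--     'Belgium': 'Europe',
--     'Italy': 'Europe',
--     'Spain': 'Europe',
--     'Portugal': 'Europe',
--     'Poland': 'Europe',
--     'Czech Republic': 'Europe',
--     'Hungary': 'Europe',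
--     'Romania': 'Europe',
--     'Slovakia': 'Europe',
--     'Slovenia': 'Europe',
--     'Croatia': 'Europe',
--     'Greece': 'Europe',
--     'Bulgaria': 'Europe',
--     'Lithuania': 'Europe',
--     'Latvia': 'Europe',
--     'Estonia': 'Europe',
--     'Ireland': 'Europe',
--     'Luxembourg': 'Europe',
--     'Turkey': 'Middle East',
--     'Saudi Arabia': 'Middle East',
--     'UAE': 'Middle East',
--     'Qatar': 'Middle East',
--     'Jordan': 'Middle East',
--     'Kuwait': 'Middle East',
--     'Oman': 'Middle East',
--     'Bahrain': 'Middle East',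
--     'Egypt': 'Middle East',
--     'Morocco': 'Middle East',
--     'Tunisia': 'Middle East',
--     'Algeria': 'Middle East',
--     'China': 'Asia',
--     'Japan': 'Asia',
--     'South Korea': 'Asia',
--     'Malaysia': 'Asia',
--     'Singapore': 'Asia',
--     'Thailand': 'Asia',
--     'Indonesia': 'Asia',
--     'Vietnam': 'Asia',
--     'Taiwan': 'Asia',
--     'Hong Kong': 'Asia',
--     'Pakistan': 'Asia',
--     'India': 'Asia',
--     'Bangladesh': 'Asia',
--     'Sri Lanka': 'Asia',
--     'Nepal': 'Asia',
--     'Philippines': 'Asia',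
--     'Australia': 'Oceania',
--     'New Zealand': 'Oceania',
--     'USA': 'North America',
--     'Canada': 'North America',
--     'Mexico': 'North America',
--     'Nigeria': 'Africa',
--     'South Africa': 'Africa',
--     'Kenya': 'Africa',
--     'Ghana': 'Africa',
--     'Ethiopia': 'Africa',
--     'Tanzania': 'Africa',
--     'Uganda': 'Africa',
--     'Rwanda': 'Africa',
--     'Zimbabwe': 'Africa',
--     'Brazil': 'Latin America',
--     'Colombia': 'Latin America',
--     'Peru': 'Latin America',
--     'Argentina': 'Latin America',
--     'Chile': 'Latin America',
-- }
--
-- def detect_region(country):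
--     return _COUNTRY_TO_REGION.get(country, "International")
-- ===== Notes on version B (the rewrite author's own statement) =====
-- stated objective: idiomatic
-- what changed: B stores a single flat country-to-region literal dictionary and answers each query with one dict.get lookup with default, removing A's region-by-region membership scan and the region-to-list table entirely.
import Mathlib
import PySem

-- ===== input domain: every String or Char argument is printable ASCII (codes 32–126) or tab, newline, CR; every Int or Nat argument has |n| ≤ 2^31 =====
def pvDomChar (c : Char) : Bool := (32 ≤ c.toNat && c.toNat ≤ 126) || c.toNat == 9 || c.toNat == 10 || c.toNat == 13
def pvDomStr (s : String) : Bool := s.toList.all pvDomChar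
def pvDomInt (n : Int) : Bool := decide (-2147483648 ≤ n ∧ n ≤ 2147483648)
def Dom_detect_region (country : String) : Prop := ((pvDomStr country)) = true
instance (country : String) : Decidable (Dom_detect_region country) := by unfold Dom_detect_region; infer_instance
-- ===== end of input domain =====

-- B replaces A's region-by-region membership scan over a region→country-list table
-- by one direct lookup in a flat literal country→region dictionary (objective: idiomatic).

-- ===== PORT A =====
def regionsA : List (String × List String) :=
  [("Europe", ["United Kingdom","Germany","France","Netherlands","Sweden",
               "Norway","Finland","Denmark","Switzerland","Austria","Belgium",
               "Italy","Spain","Portugal","Poland","Czech Republic","Hungary",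
               "Romania","Slovakia","Slovenia","Croatia","Greece","Bulgaria",
               "Lithuania","Latvia","Estonia","Ireland","Luxembourg"]),
   ("Middle East", ["Turkey","Saudi Arabia","UAE","Qatar","Jordan",
                    "Kuwait","Oman","Bahrain","Egypt","Morocco","Tunisia","Algeria"]),
   ("Asia", ["China","Japan","South Korea","Malaysia","Singapore",
             "Thailand","Indonesia","Vietnam","Taiwan","Hong Kong",
             "Pakistan","India","Bangladesh","Sri Lanka","Nepal","Philippines"]),
   ("Oceania", ["Australia","New Zealand"]),
   ("North America", ["USA","Canada","Mexico"]),
   ("Africa", ["Nigeria","South Africa","Kenya","Ghana","Ethiopia",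
               "Tanzania","Uganda","Rwanda","Zimbabwe"]),
   ("Latin America", ["Brazil","Colombia","Peru","Argentina","Chile"])]

-- A's loop: 'for region, countries in regions.items(): if country in countries: return region'
def loopA : List (String × List String) → String → String
  | [], _ => "International"
  | (r, cs) :: rest, c => if cs.contains c then r else loopA rest c

def detect_region (country : String) : String := loopA regionsA country

-- ===== PORT B =====
-- B's flat literal dict '_COUNTRY_TO_REGION' (all keys distinct → plain assoc list)
def countryToRegion : List (String × String) :=
  [   ("United Kingdom", "Europe"),
   ("Germany", "Europe"),
   ("France", "Europe"),
   ("Netherlands", "Europe"),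
   ("Sweden", "Europe"),
   ("Norway", "Europe"),
   ("Finland", "Europe"),
   ("Denmark", "Europe"),
   ("Switzerland", "Europe"),
   ("Austria", "Europe"),
   ("Belgium", "Europe"),
   ("Italy", "Europe"),
   ("Spain", "Europe"),
   ("Portugal", "Europe"),
   ("Poland", "Europe"),
   ("Czech Republic", "Europe"),
   ("Hungary", "Europe"),
   ("Romania", "Europe"),
   ("Slovakia", "Europe"),
   ("Slovenia", "Europe"),
   ("Croatia", "Europe"),
   ("Greece", "Europe"),
   ("Bulgaria", "Europe"),
   ("Lithuania", "Europe"),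
   ("Latvia", "Europe"),
   ("Estonia", "Europe"),
   ("Ireland", "Europe"),
   ("Luxembourg", "Europe"),
   ("Turkey", "Middle East"),
   ("Saudi Arabia", "Middle East"),
   ("UAE", "Middle East"),
   ("Qatar", "Middle East"),
   ("Jordan", "Middle East"),
   ("Kuwait", "Middle East"),
   ("Oman", "Middle East"),
   ("Bahrain", "Middle East"),
   ("Egypt", "Middle East"),
   ("Morocco", "Middle East"),
   ("Tunisia", "Middle East"),
   ("Algeria", "Middle East"),
   ("China", "Asia"),
   ("Japan", "Asia"),
   ("South Korea", "Asia"),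
   ("Malaysia", "Asia"),
   ("Singapore", "Asia"),
   ("Thailand", "Asia"),
   ("Indonesia", "Asia"),
   ("Vietnam", "Asia"),
   ("Taiwan", "Asia"),
   ("Hong Kong", "Asia"),
   ("Pakistan", "Asia"),
   ("India", "Asia"),
   ("Bangladesh", "Asia"),
   ("Sri Lanka", "Asia"),
   ("Nepal", "Asia"),
   ("Philippines", "Asia"),
   ("Australia", "Oceania"),
   ("New Zealand", "Oceania"),
   ("USA", "North America"),
   ("Canada", "North America"),
   ("Mexico", "North America"),
   ("Nigeria", "Africa"),
   ("South Africa", "Africa"),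
   ("Kenya", "Africa"),
   ("Ghana", "Africa"),
   ("Ethiopia", "Africa"),
   ("Tanzania", "Africa"),
   ("Uganda", "Africa"),
   ("Rwanda", "Africa"),
   ("Zimbabwe", "Africa"),
   ("Brazil", "Latin America"),
   ("Colombia", "Latin America"),
   ("Peru", "Latin America"),
   ("Argentina", "Latin America"),
   ("Chile", "Latin America")]

-- '.get(country, "International")' = first match in the association list, else default.
def detect_region_alt (country : String) : String :=
  ((countryToRegion.find? (fun p => p.1 == country)).map Prod.snd).getD "International"

-- ===== PRECONDITION & SPEC =====
def Spec_detect_region (country : String) (out : String) : Prop := out = detect_region_alt country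
instance (country : String) (out : String) : Decidable (Spec_detect_region country out) := by unfold Spec_detect_region; infer_instance

-- ===== CLAIM =====
def Claim_equal_detect_region : Prop := ∀ (country : String), Dom_detect_region country → Spec_detect_region country (detect_region country)

-- ===== LEMMAS AND PROOFS =====

-- first match in a one-region block of a flattened index: hit iff the country is in that region's list
lemma find?_block (cs : List String) (r c : String) (t : List (String × String)) :
    (cs.map (fun x => (x, r)) ++ t).find? (fun p => p.1 == c)
      = if cs.contains c then some (c, r) else t.find? (fun p => p.1 == c) := by
  induction cs with
  | nil => simp
  | cons hd tl ih =>
    by_cases h : hd = c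
    · subst h; simp
    · have h2 : ¬ c = hd := fun e => h e.symm
      simp [h, h2, ih]

-- A's scan over any region table equals the first-match lookup in its flattened index
lemma loopA_eq_lookup (rs : List (String × List String)) (c : String) :
    loopA rs c
      = (((rs.flatMap (fun rc => rc.2.map (fun x => (x, rc.1)))).find?
            (fun p => p.1 == c)).map Prod.snd).getD "International" := by
  induction rs with
  | nil => simp [loopA]
  | cons hd tl ih =>
    obtain ⟨r, cs⟩ := hd
    simp only [loopA]
    rw [List.flatMap_cons, find?_block]
    by_cases h : cs.contains c
    · rw [if_pos h, if_pos h]; rfl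
    · rw [if_neg h, if_neg h]; exact ih

-- B's literal flat dict is exactly the flattening of A's table (checked by evaluation)
lemma flatten_regionsA :
    regionsA.flatMap (fun rc => rc.2.map (fun x => (x, rc.1))) = countryToRegion := by
  decide

-- ===== VERDICT =====
theorem detect_region_spec : Claim_equal_detect_region := by
  intro c _
  show detect_region c = detect_region_alt c
  rw [detect_region, loopA_eq_lookup, flatten_regionsA]
  rfl
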